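-- pv_equiv track=rewrite | github.com/mazmazz/SkepticSystem | python/skepticsys/utils.py | _gen_ranges
-- ===== SOURCE A (Python) =====
-- def _gen_ranges(start, stop, step, fixed_start=False, remainder=True):
--         # detect reverse range, and enforce step sign
--         is_reverse = stop < start
--
--         # fill in step if 0
--         if step is None or step == 0:
--             step = (stop-abs(start)) if not is_reverse else -(stop-abs(start))
--
--         if (is_reverse and step > 0) or (not is_reverse and step < 0):
--             step = -step
--
--         # https://stackoverflow.com/questions/14048728/generate-list-of-range-tuples-with-given-boundaries-in-python
--         current = next_current = start
--         while (next_current < stop) if not is_reverse else (next_current > stop):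
--             next_current = next_current + step
--             if (next_current < stop) if not is_reverse else (next_current > stop):
--                 yield (current, next_current)
--             elif remainder: # elif remainder and stop-1 > next_current-step:
--                 yield (current, stop) # yield (current, stop-1)
--             else:
--                 break
--             if not fixed_start: current = next_current
-- ===== SOURCE B (Python) =====
-- def _gen_ranges(start, stop, step, fixed_start=False, remainder=True):
--     # Closed-form rewrite: compute the number of interior boundaries by ceiling
--     # division, then emit each tuple by index arithmetic instead of walking a cursor.
--     is_reverse = stop < start
--     if step is None or step == 0:
--         step = stop - abs(start)
--         if is_reverse:
--             step = -step
--     step = -abs(step) if is_reverse else abs(step)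
--     if start == stop:
--         return
--     n = -((start - stop) // step)  # ceil((stop-start)/step) = interior boundary count
--     for k in range(1, n):
--         yield (start if fixed_start else start + (k - 1) * step, start + k * step)
--     if remainder:
--         yield (start if fixed_start else start + (n - 1) * step, stop)
-- ===== Notes on version B (the rewrite author's own statement) =====
-- stated objective: alternative
-- what changed: A interleaves stepping and yielding in a cursor-walking while loop; B computes the number of interior boundaries in closed form by ceiling division and emits each (left,right) tuple directly by index arithmetic over range(1,n), with the clipped (.,stop) tail appended when remainder is set.
import Mathlib
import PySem

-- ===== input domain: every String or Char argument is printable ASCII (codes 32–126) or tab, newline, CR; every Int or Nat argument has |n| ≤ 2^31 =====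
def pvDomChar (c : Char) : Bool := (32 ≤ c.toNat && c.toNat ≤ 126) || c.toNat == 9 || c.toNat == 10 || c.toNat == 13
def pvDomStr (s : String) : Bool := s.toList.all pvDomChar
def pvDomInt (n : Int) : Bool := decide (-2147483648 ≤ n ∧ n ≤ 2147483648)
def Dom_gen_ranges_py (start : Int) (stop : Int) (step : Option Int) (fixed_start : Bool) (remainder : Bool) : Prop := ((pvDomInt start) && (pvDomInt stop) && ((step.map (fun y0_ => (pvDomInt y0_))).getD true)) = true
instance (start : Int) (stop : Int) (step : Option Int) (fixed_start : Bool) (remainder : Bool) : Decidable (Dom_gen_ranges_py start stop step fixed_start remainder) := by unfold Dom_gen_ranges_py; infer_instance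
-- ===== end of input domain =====

-- B replaces A's cursor-walking while/yield loop by a closed-form ceiling-division count
-- of the interior boundaries and emits each tuple by index arithmetic (objective: alternative).

-- ===== PORT A =====
-- the while loop of A; fuel is only a totality guard (Pre_ guarantees termination before exhaustion)
def genRangesLoopA (fuel : Nat) (current next_current stop step : Int)
    (is_reverse fixed_start remainder : Bool) : List (Int × Int) :=
  match fuel with
  | 0 => []
  | Nat.succ f =>
    if (if !is_reverse then next_current < stop else stop < next_current) then
      let nc := next_current + step
      if (if !is_reverse then nc < stop else stop < nc) then
        (current, nc) :: genRangesLoopA f (if !fixed_start then nc else current) nc stop step is_reverse fixed_start remainder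
      else if remainder then [(current, stop)]
      else []
    else []

def gen_ranges_py (start : Int) (stop : Int) (step : Option Int) (fixed_start : Bool) (remainder : Bool) : List (Int × Int) :=
  let is_reverse : Bool := stop < start
  let step1 : Int :=
    match step with
    | none => if !is_reverse then stop - |start| else -(stop - |start|)
    | some s => if s = 0 then (if !is_reverse then stop - |start| else -(stop - |start|)) else s
  let step2 : Int := if (is_reverse && step1 > 0) || (!is_reverse && step1 < 0) then -step1 else step1
  genRangesLoopA ((stop - start).natAbs + 1) start start stop step2 is_reverse fixed_start remainder

-- ===== PORT B =====
-- closed form: n = ceil((stop-start)/step) interior boundaries, tuples emitted by index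
def gen_ranges_py_alt (start : Int) (stop : Int) (step : Option Int) (fixed_start : Bool) (remainder : Bool) : List (Int × Int) :=
  let is_reverse : Bool := stop < start
  let s1 : Int :=
    match step with
    | none => if is_reverse then -(stop - |start|) else stop - |start|
    | some s => if s = 0 then (if is_reverse then -(stop - |start|) else stop - |start|) else s
  let s2 : Int := if is_reverse then -|s1| else |s1|
  if start = stop then []
  else
    let n : Int := -(PySem.Int.floordiv (start - stop) s2)
    ((PySem.List.pyRange 1 n 1).map
        (fun k => ((if fixed_start then start else start + (k - 1) * s2), start + k * s2))) ++
      (if remainder then [((if fixed_start then start else start + (n - 1) * s2), stop)] else [])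

-- ===== PRECONDITION & SPEC =====
-- Pre_ excludes exactly the inputs where A never returns: with step None/0 and stop == abs(start)
-- the filled-in step is 0 and the generator loops forever (B divides by that 0 there).
def Pre_gen_ranges_py (start : Int) (stop : Int) (step : Option Int) (fixed_start : Bool) (remainder : Bool) : Prop :=
  start = stop ∨ ¬ ((step = none ∨ step = some 0) ∧ stop = |start|)
instance (start : Int) (stop : Int) (step : Option Int) (fixed_start : Bool) (remainder : Bool) : Decidable (Pre_gen_ranges_py start stop step fixed_start remainder) := by unfold Pre_gen_ranges_py; infer_instance

def pvWitness_gen_ranges_py : Int × Int × Option Int × Bool × Bool := (0, 7, some 2, false, true)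

def Spec_gen_ranges_py (start : Int) (stop : Int) (step : Option Int) (fixed_start : Bool) (remainder : Bool) (out : List (Int × Int)) : Prop := out = gen_ranges_py_alt start stop step fixed_start remainder
instance (start : Int) (stop : Int) (step : Option Int) (fixed_start : Bool) (remainder : Bool) (out : List (Int × Int)) : Decidable (Spec_gen_ranges_py start stop step fixed_start remainder out) := by unfold Spec_gen_ranges_py; infer_instance

-- ===== CLAIM (what is proved, stated in full; the proofs are below) =====
def Claim_equal_gen_ranges_py : Prop := ∀ (start : Int) (stop : Int) (step : Option Int) (fixed_start : Bool) (remainder : Bool), Dom_gen_ranges_py start stop step fixed_start remainder → Pre_gen_ranges_py start stop step fixed_start remainder → Spec_gen_ranges_py start stop step fixed_start remainder (gen_ranges_py start stop step fixed_start remainder)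

-- ===== LEMMAS AND PROOFS =====

-- proof-side: the list of boundary positions strictly inside the interval
def genRangesBounds (fuel : Nat) (p stop step : Int) (is_reverse : Bool) : List Int :=
  match fuel with
  | 0 => []
  | Nat.succ f =>
    if (if is_reverse then stop < p else p < stop) then
      p :: genRangesBounds f (p + step) stop step is_reverse
    else []

-- proof-side: pairing consecutive boundaries with the clipped remainder tail
def pvPairup (a stopv : Int) (fs rem : Bool) (b : List Int) : List (Int × Int) :=
  ((b.zip (List.drop 1 b)).map (fun lr => ((if fs then a else lr.1), lr.2))) ++
    (if (!b.isEmpty) && rem then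
       match PySem.List.pyGet? b (-1) with
       | some l => [((if fs then a else l), stopv)]
       | none => []
     else [])

lemma pvPairup_nil (a stopv : Int) (fs rem : Bool) : pvPairup a stopv fs rem [] = [] := by
  simp [pvPairup]

lemma pvPairup_singleton (a stopv x : Int) (fs rem : Bool) :
    pvPairup a stopv fs rem [x] = if rem then [((if fs then a else x), stopv)] else [] := by
  cases rem <;> simp [pvPairup, PySem.List.pyGet?_neg_one]

lemma pvPairup_cons_cons (a stopv x y : Int) (t : List Int) (fs rem : Bool) :
    pvPairup a stopv fs rem (x :: y :: t)
      = ((if fs then a else x), y) :: pvPairup a stopv fs rem (y :: t) := by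
  simp [pvPairup, PySem.List.pyGet?_neg_one, List.getLast?_cons_cons]

lemma pvPairup_false_irrel (a a' stopv : Int) (rem : Bool) (b : List Int) :
    pvPairup a stopv false rem b = pvPairup a' stopv false rem b := by
  simp [pvPairup]

lemma genRangesBounds_notin (f : Nat) (p stop step : Int) (rev : Bool)
    (h : (if rev then stop < p else p < stop) = False) :
    genRangesBounds f p stop step rev = [] := by
  cases f <;> simp [genRangesBounds, h]

-- A's loop equals pairing over the boundary list
lemma pvLoopEqPair (stop step : Int) (rev fs rem : Bool)
    (hstep : if rev then step ≤ -1 else 1 ≤ step) :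
    ∀ (fuel : Nat) (c cur : Int), (stop - c).natAbs < fuel → (fs = false → cur = c) →
      genRangesLoopA fuel cur c stop step rev fs rem
        = pvPairup cur stop fs rem (genRangesBounds fuel c stop step rev) := by
  intro fuel
  induction fuel with
  | zero => intro c cur hf _; omega
  | succ f ih =>
    intro c cur hf hcur
    by_cases hin : (if rev then stop < c else c < stop)
    · have hin' : (if !rev then c < stop else stop < c) = true := by
        cases rev <;> simp_all
      have hrw : genRangesBounds (f + 1) c stop step rev
          = c :: genRangesBounds f (c + step) stop step rev := by
        simp [genRangesBounds, hin]
      by_cases hin2 : (if rev then stop < c + step else c + step < stop)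
      · have hin2' : (if !rev then c + step < stop else stop < c + step) = true := by
          cases rev <;> simp_all
        have hfuel2 : (stop - (c + step)).natAbs < f := by
          cases rev <;> simp_all <;> omega
        have hfpos : 0 < f := by omega
        obtain ⟨f', rfl⟩ : ∃ f', f = f' + 1 := ⟨f - 1, by omega⟩
        have hrw2 : genRangesBounds (f' + 1) (c + step) stop step rev
            = (c + step) :: genRangesBounds f' (c + step + step) stop step rev := by
          simp [genRangesBounds, hin2]
        have hIH := ih (c + step) (if !fs then c + step else cur) hfuel2 (by cases fs <;> simp)
        cases fs with
        | false =>
          have hc : cur = c := hcur rfl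
          subst hc
          simp only [genRangesLoopA, hin', hin2', if_true, Bool.not_false] at *
          rw [hIH, hrw, hrw2, pvPairup_cons_cons]
          simp [pvPairup_false_irrel (cur + step) cur]
        | true =>
          simp only [genRangesLoopA, hin', hin2', if_true, Bool.not_true] at *
          rw [hIH, hrw, hrw2, pvPairup_cons_cons]
          simp
      · have hin2' : (if !rev then c + step < stop else stop < c + step) = false := by
          cases rev <;> simp_all
        have hb2 : genRangesBounds f (c + step) stop step rev = [] := by
          apply genRangesBounds_notin
          cases rev <;> simp_all
        rw [hrw, hb2, pvPairup_singleton]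
        simp only [genRangesLoopA, hin', hin2']
        cases rem with
        | false => simp
        | true =>
          cases fs with
          | false => simp [hcur rfl]
          | true => simp
    · have hin' : (if !rev then c < stop else stop < c) = false := by
        cases rev <;> simp_all
      have hb : genRangesBounds (f + 1) c stop step rev = [] := by
        apply genRangesBounds_notin
        cases rev <;> simp_all
      rw [hb, pvPairup_nil]
      simp [genRangesLoopA, hin]

-- arithmetic helpers about floor division
lemma pvFdAdd (a b : Int) (hb : b ≠ 0) :
    PySem.Int.floordiv (a + b) b = PySem.Int.floordiv a b + 1 := by
  have := Int.add_mul_fdiv_right a 1 hb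
  simpa using this

lemma pvFdRev (a b : Int) : PySem.Int.floordiv a b = PySem.Int.floordiv (-a) (-b) := by
  have := PySem.Int.floordiv_neg_neg (-a) (-b)
  simpa using this.symm

lemma pvFdNegOfNeg (a b : Int) (ha : a < 0) (hb : 1 ≤ b) : PySem.Int.floordiv a b ≤ -1 := by
  have h := (PySem.Int.floordiv_eq_iff_of_pos (a := a) (b := b)
    (q := PySem.Int.floordiv a b) (by omega)).mp rfl
  by_contra hq
  have h0 : 0 ≤ PySem.Int.floordiv a b := by omega
  nlinarith [h.1]

lemma pvFdNonnegOf (a b : Int) (ha : 0 ≤ a) (hb : 1 ≤ b) : 0 ≤ PySem.Int.floordiv a b :=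
  Int.fdiv_nonneg ha (by omega)

-- directional versions, dispatching on the reverse flag
lemma pvFdNegDir (a step : Int) (rev : Bool) (hs : if rev then step ≤ -1 else 1 ≤ step)
    (ha : if rev then 0 < a else a < 0) : PySem.Int.floordiv a step ≤ -1 := by
  cases rev with
  | false => exact pvFdNegOfNeg a step (by simpa using ha) (by simpa using hs)
  | true =>
    rw [pvFdRev]
    simp at ha hs
    exact pvFdNegOfNeg (-a) (-step) (by omega) (by omega)

lemma pvFdNonnegDir (a step : Int) (rev : Bool) (hs : if rev then step ≤ -1 else 1 ≤ step)
    (ha : if rev then a ≤ 0 else 0 ≤ a) : 0 ≤ PySem.Int.floordiv a step := by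
  cases rev with
  | false => exact pvFdNonnegOf a step (by simpa using ha) (by simpa using hs)
  | true =>
    rw [pvFdRev]
    simp at ha hs
    exact pvFdNonnegOf (-a) (-step) (by omega) (by omega)

-- the boundary list is an arithmetic progression of closed-form length
lemma pvBoundsArith (stop step : Int) (rev : Bool)
    (hs : if rev then step ≤ -1 else 1 ≤ step) :
    ∀ (fuel : Nat) (p : Int), (stop - p).natAbs < fuel →
      genRangesBounds fuel p stop step rev
        = (List.range (-(PySem.Int.floordiv (p - stop) step)).toNat).map (fun (i : Nat) => p + (i : Int) * step) := by
  have hstep0 : step ≠ 0 := by cases rev <;> simp at hs <;> omega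
  intro fuel
  induction fuel with
  | zero => intro p hf; omega
  | succ f ih =>
    intro p hf
    by_cases hin : (if rev then stop < p else p < stop)
    · have hrw : genRangesBounds (f + 1) p stop step rev
          = p :: genRangesBounds f (p + step) stop step rev := by
        simp [genRangesBounds, hin]
      have hge1 : 1 ≤ -(PySem.Int.floordiv (p - stop) step) := by
        have h := pvFdNegDir (p - stop) step rev hs (by cases rev <;> simp_all <;> omega)
        omega
      have hrec : PySem.Int.floordiv (p + step - stop) step
          = PySem.Int.floordiv (p - stop) step + 1 := by
        have he : p + step - stop = (p - stop) + step := by ring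
        rw [he, pvFdAdd _ _ hstep0]
      by_cases hin2 : (if rev then stop < p + step else p + step < stop)
      · have hfuel2 : (stop - (p + step)).natAbs < f := by
          cases rev <;> simp_all <;> omega
        rw [hrw, ih (p + step) hfuel2]
        have htn : (-(PySem.Int.floordiv (p - stop) step)).toNat
            = (-(PySem.Int.floordiv (p + step - stop) step)).toNat + 1 := by
          rw [hrec]; omega
        rw [htn]
        rw [List.range_succ_eq_map]
        rw [List.map_cons]
        rw [List.map_map]
        congr 1
        · norm_num
        · apply List.map_congr_left
          intro i _
          simp only [Function.comp_apply]
          push_cast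
          ring
      · -- overshoot: exactly one boundary remains
        have hb2 : genRangesBounds f (p + step) stop step rev = [] := by
          apply genRangesBounds_notin
          cases rev <;> simp_all
        have hle : 0 ≤ PySem.Int.floordiv (p + step - stop) step :=
          pvFdNonnegDir _ _ rev hs (by cases rev <;> simp_all <;> omega)
        have hone : (-(PySem.Int.floordiv (p - stop) step)).toNat = 1 := by omega
        rw [hrw, hb2, hone]
        norm_num [List.range_one]
    · have hb : genRangesBounds (f + 1) p stop step rev = [] := by
        apply genRangesBounds_notin
        cases rev <;> simp_all
      have hle : 0 ≤ PySem.Int.floordiv (p - stop) step :=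
        pvFdNonnegDir _ _ rev hs (by cases rev <;> simp_all <;> omega)
      have h0 : (-(PySem.Int.floordiv (p - stop) step)).toNat = 0 := by omega
      rw [hb, h0]
      simp

-- pairing an arithmetic-progression list = B's indexed emission shape
lemma pvPairP (a stopv : Int) (fs rem : Bool) :
    ∀ (N : Nat) (f : Nat → Int), 1 ≤ N →
      pvPairup a stopv fs rem ((List.range N).map f)
        = ((List.range (N - 1)).map (fun i => ((if fs then a else f i), f (i + 1)))) ++
            (if rem then [((if fs then a else f (N - 1)), stopv)] else []) := by
  intro N
  induction N with
  | zero => intro f h; omega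
  | succ m ih =>
    intro f hm
    cases m with
    | zero =>
      simp [List.range_one, pvPairup_singleton]
    | succ m' =>
      have h1 : List.range (m' + 1 + 1) = 0 :: (List.range (m' + 1)).map Nat.succ :=
        List.range_succ_eq_map
      have h2 : List.range (m' + 1) = 0 :: (List.range m').map Nat.succ :=
        List.range_succ_eq_map
      have hlist : (List.range (m' + 1 + 1)).map f
          = f 0 :: f 1 :: (List.range m').map (fun i => f (i + 2)) := by
        rw [h1]
        simp only [List.map_cons, List.map_map]
        rw [h2]
        simp [Function.comp]
      have htail : f 1 :: (List.range m').map (fun i => f (i + 2))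
          = (List.range (m' + 1)).map (fun i => f (i + 1)) := by
        rw [h2]; simp [Function.comp]
      rw [hlist, pvPairup_cons_cons, htail, ih (fun i => f (i + 1)) (by omega)]
      have hpair : (List.range (m' + 1)).map (fun i => ((if fs then a else f i), f (i + 1)))
          = ((if fs then a else f 0), f 1)
              :: (List.range m').map (fun i => ((if fs then a else f (i + 1)), f (i + 2))) := by
        rw [h2]; simp [Function.comp]
      simp only [Nat.add_sub_cancel]
      rw [hpair]
      simp

-- the preambles of both ports produce the same step
lemma pvStepEq (s1 : Int) (rev : Bool) :
    (if (rev && s1 > 0) || (!rev && s1 < 0) then -s1 else s1)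
      = (if rev then -|s1| else |s1|) := by
  rcases abs_cases s1 with ⟨h1, h2⟩ | ⟨h1, h2⟩ <;> cases rev <;> simp <;> split_ifs <;> omega

-- proof-side spelled-out body of B's else branch
def pvTailB (start stop s2 : Int) (fs rem : Bool) : List (Int × Int) :=
  ((PySem.List.pyRange 1 (-(PySem.Int.floordiv (start - stop) s2)) 1).map
      (fun k => ((if fs then start else start + (k - 1) * s2), start + k * s2))) ++
    (if rem then [((if fs then start else start + ((-(PySem.Int.floordiv (start - stop) s2)) - 1) * s2), stop)] else [])

-- A (with its sign-fixed step) equals B's closed-form body, for equal preamble values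
lemma pvMainB (start stop sA sB : Int) (rev fs rem : Bool)
    (hrev : rev = decide (stop < start)) (hsAB : sA = sB)
    (h : start = stop ∨ sB ≠ 0) :
    genRangesLoopA ((stop - start).natAbs + 1) start start stop
        (if (rev && sA > 0) || (!rev && sA < 0) then -sA else sA) rev fs rem
      = (if start = stop then [] else pvTailB start stop (if rev then -|sB| else |sB|) fs rem) := by
  subst hsAB
  by_cases heq : start = stop
  · subst heq
    subst hrev
    simp [genRangesLoopA]
  · rw [if_neg heq, pvStepEq]
    have hne : sA ≠ 0 := h.resolve_left heq
    have habs : 0 < |sA| := abs_pos.mpr hne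
    have hsign : if rev then (if rev then -|sA| else |sA|) ≤ -1
        else 1 ≤ (if rev then -|sA| else |sA|) := by
      cases rev <;> simp <;> omega
    set s2 : Int := (if rev then -|sA| else |sA|) with hs2
    have hin0 : (if rev then stop < start else start < stop) := by
      subst hrev
      by_cases hlt : stop < start <;> simp [hlt] <;> omega
    rw [pvLoopEqPair stop s2 rev fs rem hsign _ start start (by omega) (fun _ => rfl)]
    rw [pvBoundsArith stop s2 rev hsign _ start (by omega)]
    set nI : Int := -(PySem.Int.floordiv (start - stop) s2) with hnI
    have hge1 : 1 ≤ nI := by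
      have := pvFdNegDir (start - stop) s2 rev hsign (by cases rev <;> simp_all <;> omega)
      omega
    rw [pvPairP start stop fs rem nI.toNat (fun (i : Nat) => start + (i : Int) * s2) (by omega)]
    unfold pvTailB
    rw [PySem.List.pyRange_one]
    have hlen : (nI - 1).toNat = nI.toNat - 1 := by omega
    rw [hlen]
    simp only [List.map_map]
    congr 1
    · apply List.map_congr_left
      intro i _
      simp only [Function.comp_apply, Prod.mk.injEq]
      constructor
      · cases fs with
        | true => simp
        | false =>
          simp only [if_neg (by simp : ¬(false = true))]
          congr 1
          push_cast
          ring
      · push_cast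
        ring
    · cases rem with
      | false => simp
      | true =>
        have hc : ((nI.toNat - 1 : Nat) : Int) = nI - 1 := by omega
        simp only [hc]
        rw [← hnI]

-- ===== VERDICT (by name: the statement is the Claim_ definition above) =====
theorem gen_ranges_py_spec : Claim_equal_gen_ranges_py := by
  intro start stop step fs rem _ hpre
  unfold Spec_gen_ranges_py gen_ranges_py gen_ranges_py_alt
  refine pvMainB start stop _ _ _ fs rem rfl ?_ ?_
  · -- the two preambles compute the same fill value
    cases step with
    | none => by_cases h : stop < start <;> simp [h]
    | some s => by_cases h : stop < start <;> by_cases h2 : s = 0 <;> simp [h, h2]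
  · -- under Pre_, either start = stop or the filled step is nonzero
    rcases hpre with h | h
    · exact Or.inl h
    · right
      cases step with
      | none =>
        have hst : stop ≠ |start| := fun hh => h ⟨Or.inl rfl, hh⟩
        by_cases hlt : stop < start <;> simp [hlt] <;> omega
      | some s =>
        by_cases hz : s = 0
        · subst hz
          have hst : stop ≠ |start| := fun hh => h ⟨Or.inr rfl, hh⟩
          by_cases hlt : stop < start <;> simp [hlt] <;> omega
        · by_cases hlt : stop < start <;> simp [hlt, hz]
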